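-- pv_equiv track=rewrite | github.com/pypi-data/pypi-mirror-334 | packages/tableconv/tableconv-1.9989.20250317-py3-none-any.whl/tableconv/adapters/df/ascii.py | render_unicodebox
-- ===== SOURCE A (Python) =====
-- def _render_value(value):
--     if value is None:
--         return ""
--     return str(value).replace("\n", "\\n")
--
-- def _get_serialized_rows(rows):
--     return [{key: _render_value(value) for key, value in row.items()} for row in rows]
--
-- def _get_column_max_lengths(rows, column_names):
--     return {column: max([len(row[column]) for row in rows] + [len(column)]) for column in column_names}
--
-- def render_unicodebox(ordered_fields, rows):
--     """Text table rendering inspired by ClickHouse."""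
--     serialized_rows = _get_serialized_rows(rows)
--     max_lengths = _get_column_max_lengths(serialized_rows, ordered_fields)
--
--     output_lines = []
--     output_lines.append("┌─" + "─┬─".join([field.ljust(max_lengths[field], "─") for field in ordered_fields]) + "─┐")
--     for row in serialized_rows:
--         rendered_values_list = []
--         for field in ordered_fields:
--             rendered_values_list.append(row[field].ljust(max_lengths[field]))
--         output_lines.append("│ " + " │ ".join(rendered_values_list) + " │")
--     output_lines.append("└─" + "─┴─".join(["─" * max_lengths[field] for field in ordered_fields]) + "─┘")
--     return "\n".join(output_lines)
-- ===== SOURCE B (Python) =====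
-- def render_unicodebox(ordered_fields, rows):
--     """Text table rendering inspired by ClickHouse."""
--     def cell(v):
--         return "" if v is None else str(v).replace("\n", "\\n")
--
--     # Column-major streaming: all output lines are grown in lockstep, one
--     # column at a time; no widths table or per-line re-rendering pass exists.
--     n = len(rows)
--     lines = ["┌─"] + ["│ "] * n + ["└─"]
--     seps = ["─┬─"] + [" │ "] * n + ["─┴─"]
--     first = True
--     for f in ordered_fields:
--         cells = [cell(row[f]) for row in rows]
--         w = max([len(f)] + [len(c) for c in cells])
--         col = [f.ljust(w, "─")] + [c.ljust(w) for c in cells] + ["─" * w]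
--         lines = [ln + ("" if first else sp) + p for ln, sp, p in zip(lines, seps, col)]
--         first = False
--     rights = ["─┐"] + [" │"] * n + ["─┘"]
--     return "\n".join(ln + r for ln, r in zip(lines, rights))
-- ===== Notes on version B (the rewrite author's own statement) =====
-- stated objective: alternative
-- what changed: Column-major streaming assembly: B seeds every output line (top border, one per row, bottom border) with its left edge and grows all of them in lockstep, one column at a time, computing that column's cells and width inline and appending the padded column slice plus separator to each line, instead of A's staged pipeline (serialize all rows, build a widths dict by per-column rescans, then render line by line with dict lookups).
import Mathlib
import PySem

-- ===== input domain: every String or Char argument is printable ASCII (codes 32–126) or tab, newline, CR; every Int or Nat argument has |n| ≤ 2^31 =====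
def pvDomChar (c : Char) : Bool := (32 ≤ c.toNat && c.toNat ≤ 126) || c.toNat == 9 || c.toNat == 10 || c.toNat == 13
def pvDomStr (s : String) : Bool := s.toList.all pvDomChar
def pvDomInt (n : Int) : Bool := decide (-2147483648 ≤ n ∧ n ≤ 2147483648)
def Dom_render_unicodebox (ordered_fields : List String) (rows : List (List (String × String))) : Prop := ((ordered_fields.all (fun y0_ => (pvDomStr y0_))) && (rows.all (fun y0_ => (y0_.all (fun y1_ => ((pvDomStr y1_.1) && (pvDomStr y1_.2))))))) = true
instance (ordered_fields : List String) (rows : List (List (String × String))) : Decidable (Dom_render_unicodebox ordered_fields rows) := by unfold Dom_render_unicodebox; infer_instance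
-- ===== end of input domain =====

-- B replaces A's staged pipeline (serialize all rows, widths dict by per-column rescans, then
-- line-by-line rendering with dict lookups) by column-major streaming: every output line is
-- seeded with its left edge and all lines grow in lockstep, one column at a time
-- (objective: alternative decomposition, same cost).

-- str.ljust(w, fill) — Python builtin, used by both ports
def pvLjust (s : List Char) (w : Nat) (fill : Char) : List Char :=
  s ++ List.replicate (w - s.length) fill

-- ===== PORT A =====
-- _render_value(value).  (values are str here; '.replace("\n", "\\n")')
def pvRenderValueA (value : String) : List Char :=
  PySem.Chars.replace value.toList ['\n'] ['\\', 'n']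

-- {key: _render_value(value) for key, value in row.items()}  (row is a dict: keys unique)
def pvSerializedRowA (row : List (String × String)) : PySem.Dict String (List Char) :=
  PySem.Dict.mk (row.map (fun kv => (kv.1, pvRenderValueA kv.2)))

-- Python max() on a nonempty list (the [] case is unreachable: the list ends with [len(column)])
def pvMaxA : List Nat → Nat
  | [] => 0
  | h :: t => t.foldl max h

-- max([len(row[column]) for row in rows] + [len(column)])
def pvColumnMaxA (srows : List (PySem.Dict String (List Char))) (column : String) : Nat :=
  pvMaxA ((srows.map (fun row => (row.getD column []).length)) ++ [column.toList.length])

-- {column: max(...) for column in column_names}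
def pvMaxLengthsA (srows : List (PySem.Dict String (List Char))) (column_names : List String) :
    PySem.Dict String Nat :=
  column_names.foldl (fun d c => d.insert c (pvColumnMaxA srows c)) (PySem.Dict.mk [])

def render_unicodebox (ordered_fields : List String) (rows : List (List (String × String))) : String :=
  let serialized_rows := rows.map pvSerializedRowA
  let max_lengths := pvMaxLengthsA serialized_rows ordered_fields
  let output_lines : List (List Char) := []
  let output_lines := output_lines ++
    ["┌─".toList ++ PySem.Chars.join "─┬─".toList
      (ordered_fields.map (fun field => pvLjust field.toList (max_lengths.getD field 0) '─')) ++ "─┐".toList]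
  let output_lines := serialized_rows.foldl (fun acc row =>
    acc ++ ["│ ".toList ++ PySem.Chars.join " │ ".toList
      (ordered_fields.foldl (fun l field => l ++ [pvLjust (row.getD field []) (max_lengths.getD field 0) ' ']) []) ++
      " │".toList]) output_lines
  let output_lines := output_lines ++
    ["└─".toList ++ PySem.Chars.join "─┴─".toList
      (ordered_fields.map (fun field => List.replicate (max_lengths.getD field 0) '─')) ++ "─┘".toList]
  String.ofList (PySem.Chars.join ['\n'] output_lines)

-- ===== PORT B =====
-- cell(v) = str(v).replace("\n", "\\n")  (None never occurs for str values)
def pvCellB (value : String) : List Char :=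
  PySem.Chars.replace value.toList ['\n'] ['\\', 'n']

-- one iteration of B's 'for f in ordered_fields' loop: grow every line by this column
def pvStepB (rows : List (List (String × String))) (seps : List (List Char))
    (st : List (List Char) × Bool) (f : String) : List (List Char) × Bool :=
  let cells := rows.map (fun row => pvCellB ((PySem.Dict.mk row).getD f ""))
  let w := (cells.map List.length).foldl max f.toList.length
  let col := [pvLjust f.toList w '─'] ++ cells.map (fun c => pvLjust c w ' ') ++ [List.replicate w '─']
  (((st.1.zip seps).zip col).map (fun p => p.1.1 ++ (if st.2 then [] else p.1.2) ++ p.2), false)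

def render_unicodebox_alt (ordered_fields : List String) (rows : List (List (String × String))) : String :=
  let n := rows.length
  let lines0 : List (List Char) := ["┌─".toList] ++ List.replicate n "│ ".toList ++ ["└─".toList]
  let seps : List (List Char) := ["─┬─".toList] ++ List.replicate n " │ ".toList ++ ["─┴─".toList]
  let lines := (ordered_fields.foldl (pvStepB rows seps) (lines0, true)).1
  let rights : List (List Char) := ["─┐".toList] ++ List.replicate n " │".toList ++ ["─┘".toList]
  String.ofList (PySem.Chars.join ['\n'] ((lines.zip rights).map (fun p => p.1 ++ p.2)))

-- ===== PRECONDITION & SPEC =====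
-- Pre_ excludes exactly the inputs on which Python A raises KeyError (row[field] with a field
-- missing from some row); B raises there too.
def Pre_render_unicodebox (ordered_fields : List String) (rows : List (List (String × String))) : Prop :=
  ∀ row ∈ rows, ∀ f ∈ ordered_fields, f ∈ row.map Prod.fst
instance (ordered_fields : List String) (rows : List (List (String × String))) : Decidable (Pre_render_unicodebox ordered_fields rows) := by unfold Pre_render_unicodebox; infer_instance

def pvWitness_render_unicodebox : List String × (List (List (String × String))) :=
  (["a", "bb"], [[("a", "1"), ("bb", "x\ny")], [("bb", ""), ("a", "zz")]])

def Spec_render_unicodebox (ordered_fields : List String) (rows : List (List (String × String))) (out : String) : Prop := out = render_unicodebox_alt ordered_fields rows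
instance (ordered_fields : List String) (rows : List (List (String × String))) (out : String) : Decidable (Spec_render_unicodebox ordered_fields rows out) := by unfold Spec_render_unicodebox; infer_instance

-- ===== CLAIM (what is proved, stated in full; the proofs are below) =====
def Claim_equal_render_unicodebox : Prop := ∀ (ordered_fields : List String) (rows : List (List (String × String))), Dom_render_unicodebox ordered_fields rows → Pre_render_unicodebox ordered_fields rows → Spec_render_unicodebox ordered_fields rows (render_unicodebox ordered_fields rows)

-- ===== LEMMAS AND PROOFS =====

-- the common cell value both sides compute for field f of row
def pvCell (row : List (String × String)) (f : String) : List Char :=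
  match (PySem.Dict.mk row).get? f with
  | none => []
  | some v => pvRenderValueA v

-- the common column width for field f
def pvW (rows : List (List (String × String))) (f : String) : Nat :=
  pvColumnMaxA (rows.map pvSerializedRowA) f

-- B's invariant shape: the lines after the columns of p have been appended
def pvL (rows : List (List (String × String))) (p : List String) : List (List Char) :=
  ["┌─".toList ++ PySem.Chars.join "─┬─".toList (p.map (fun f => pvLjust f.toList (pvW rows f) '─'))]
  ++ rows.map (fun row => "│ ".toList ++ PySem.Chars.join " │ ".toList
       (p.map (fun f => pvLjust (pvCell row f) (pvW rows f) ' ')))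
  ++ ["└─".toList ++ PySem.Chars.join "─┴─".toList (p.map (fun f => List.replicate (pvW rows f) '─'))]

lemma get?_serializedRowA (row : List (String × String)) (f : String) :
    (pvSerializedRowA row).get? f = ((PySem.Dict.mk row).get? f).map pvRenderValueA := by
  induction row with
  | nil => rfl
  | cons kv t ih =>
    show (PySem.Dict.mk ((kv :: t).map (fun kv => (kv.1, pvRenderValueA kv.2)))).get? f = _
    rw [List.map_cons, PySem.Dict.get?_mk_cons, PySem.Dict.get?_mk_cons]
    by_cases h : (kv.1 == f) = true
    · simp [h]
    · simp only [if_neg h]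
      simpa only [pvSerializedRowA] using ih

lemma getD_serializedRowA (row : List (String × String)) (f : String) :
    (pvSerializedRowA row).getD f [] = pvCell row f := by
  show ((pvSerializedRowA row).get? f).getD [] = _
  rw [get?_serializedRowA]
  unfold pvCell
  cases (PySem.Dict.mk row).get? f <;> rfl

lemma cellB_eq (row : List (String × String)) (f : String) :
    pvCellB ((PySem.Dict.mk row).getD f "") = pvCell row f := by
  show pvCellB (((PySem.Dict.mk row).get? f).getD "") = _
  unfold pvCell
  cases (PySem.Dict.mk row).get? f <;> rfl

lemma get?_foldl_insert_of_not_mem (g : String → Nat) (fields : List String) (f : String)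
    (hf : f ∉ fields) (d0 : PySem.Dict String Nat) :
    ((fields.foldl (fun d c => d.insert c (g c)) d0).get? f) = d0.get? f := by
  induction fields generalizing d0 with
  | nil => rfl
  | cons h t ih =>
    simp only [List.mem_cons, not_or] at hf
    rw [List.foldl_cons, ih hf.2, PySem.Dict.get?_insert_of_ne _ _ hf.1]

lemma getD_foldl_insert (g : String → Nat) (fields : List String) (f : String)
    (hf : f ∈ fields) (d0 : PySem.Dict String Nat) :
    ((fields.foldl (fun d c => d.insert c (g c)) d0).getD f 0) = g f := by
  induction fields generalizing d0 with
  | nil => cases hf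
  | cons h t ih =>
    rw [List.foldl_cons]
    by_cases hft : f ∈ t
    · exact ih hft _
    · have hfh : f = h := by
        rcases List.mem_cons.mp hf with h1 | h2
        · exact h1
        · exact absurd h2 hft
      subst hfh
      show ((t.foldl (fun d c => d.insert c (g c)) (d0.insert f (g f))).get? f).getD 0 = g f
      rw [get?_foldl_insert_of_not_mem g t f hft, PySem.Dict.get?_insert_self]
      rfl

lemma getD_maxLengthsA (rows : List (List (String × String))) (fields : List String)
    (f : String) (hf : f ∈ fields) :
    (pvMaxLengthsA (rows.map pvSerializedRowA) fields).getD f 0 = pvW rows f :=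
  getD_foldl_insert (pvColumnMaxA (rows.map pvSerializedRowA)) fields f hf _

lemma foldl_max_pull (t : List Nat) (a : Nat) :
    ∀ b : Nat, t.foldl max (max a b) = max a (t.foldl max b) := by
  induction t with
  | nil => intro b; rfl
  | cons h t ih =>
    intro b
    simp only [List.foldl_cons, max_assoc]
    exact ih (max b h)

lemma pvMaxA_append (l : List Nat) (x : Nat) : pvMaxA (l ++ [x]) = l.foldl max x := by
  cases l with
  | nil => rfl
  | cons h t =>
    show (t ++ [x]).foldl max h = t.foldl max (max x h)
    rw [List.foldl_append, List.foldl_cons, List.foldl_nil, foldl_max_pull t x h]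
    exact max_comm _ _

-- B's inline width for field f is the common width pvW
lemma widthB_eq (rows : List (List (String × String))) (f : String) :
    (((rows.map (fun row => pvCellB ((PySem.Dict.mk row).getD f ""))).map List.length).foldl
      max f.toList.length) = pvW rows f := by
  unfold pvW pvColumnMaxA
  rw [pvMaxA_append, List.map_map, List.map_map]
  refine congrArg (fun l => List.foldl max f.toList.length l) ?_
  refine List.map_congr_left (fun row _ => ?_)
  simp only [Function.comp_apply]
  rw [cellB_eq, getD_serializedRowA]

-- join with a new last chunk
lemma join_append_singleton (sep x : List Char) (xs : List (List Char)) (hxs : xs ≠ []) :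
    PySem.Chars.join sep (xs ++ [x]) = PySem.Chars.join sep xs ++ sep ++ x := by
  induction xs with
  | nil => cases hxs rfl
  | cons h t ih =>
    cases t with
    | nil => simp [PySem.Chars.join_singleton, PySem.Chars.join_cons_cons]
    | cons h2 t2 =>
      have ih' := ih (by simp)
      simp only [List.cons_append, PySem.Chars.join_cons_cons] at ih' ⊢
      rw [ih']
      simp [List.append_assoc]


-- mapping over the zip of three lists of the lockstep shape [x] ++ (n middles) ++ [y]
lemma lockstep3 {α : Type} (F : List Char → List Char → List Char → List Char)
    (s2 : List Char) (g h : α → List Char) (rows : List α) :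
    ∀ (t b s1 s3 c1 c3 : List Char),
    ((( [t] ++ rows.map g ++ [b] ).zip ([s1] ++ List.replicate rows.length s2 ++ [s3])).zip
      ([c1] ++ rows.map h ++ [c3])).map (fun p => F p.1.1 p.1.2 p.2)
    = [F t s1 c1] ++ rows.map (fun r => F (g r) s2 (h r)) ++ [F b s3 c3] := by
  induction rows with
  | nil => intro t b s1 s3 c1 c3; rfl
  | cons r rs ih =>
    intro t b s1 s3 c1 c3
    simp only [List.map_cons, List.length_cons, List.replicate_succ, List.cons_append,
      List.zip_cons_cons]
    have := ih (g r) b s2 s3 (h r) c3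
    simp only [List.cons_append, List.nil_append] at this ⊢
    rw [this]

lemma lockstep2 {α : Type} (r2 : List Char) (g : α → List Char) (rows : List α) :
    ∀ (t b r1 r3 : List Char),
    (( [t] ++ rows.map g ++ [b] ).zip ([r1] ++ List.replicate rows.length r2 ++ [r3])).map
      (fun p => p.1 ++ p.2)
    = [t ++ r1] ++ rows.map (fun x => g x ++ r2) ++ [b ++ r3] := by
  induction rows with
  | nil => intro t b r1 r3; rfl
  | cons r rs ih =>
    intro t b r1 r3
    simp only [List.map_cons, List.length_cons, List.replicate_succ, List.cons_append,
      List.zip_cons_cons]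
    have := ih (g r) b r2 r3
    simp only [List.cons_append, List.nil_append] at this ⊢
    rw [this]

-- one loop iteration preserves the lockstep invariant
lemma stepB_invariant (rows : List (List (String × String))) (p : List String) (f : String) :
    pvStepB rows (["─┬─".toList] ++ List.replicate rows.length " │ ".toList ++ ["─┴─".toList])
      (pvL rows p, p.isEmpty) f = (pvL rows (p ++ [f]), false) := by
  unfold pvStepB
  simp only []
  refine Prod.ext ?_ rfl
  show (((pvL rows p).zip _).zip _).map _ = _
  have hcells : (rows.map (fun row => pvCellB ((PySem.Dict.mk row).getD f ""))) =
      rows.map (fun row => pvCell row f) :=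
    List.map_congr_left (fun row _ => cellB_eq row f)
  rw [widthB_eq rows f, hcells, List.map_map]
  simp only [Function.comp_def]
  unfold pvL
  rw [lockstep3 (fun a s c => a ++ (if p.isEmpty then [] else s) ++ c) " │ ".toList
    (fun row => "│ ".toList ++ PySem.Chars.join " │ ".toList
      (p.map (fun f => pvLjust (pvCell row f) (pvW rows f) ' ')))
    (fun row => pvLjust (pvCell row f) (pvW rows f) ' ') rows]
  cases p with
  | nil =>
    simp [PySem.Chars.join_singleton, PySem.Chars.join_nil]
  | cons q qs =>
    simp only [List.isEmpty_cons, if_neg (by simp : ¬ (false = true)), List.map_append,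
      List.map_cons, List.map_nil]
    simp only [ne_eq, List.cons_ne_nil, not_false_eq_true, join_append_singleton]
    simp [List.append_assoc]

-- the whole fold lands on the lockstep shape
lemma foldB_eq (rows : List (List (String × String))) :
    ∀ (fs p : List String),
    fs.foldl (pvStepB rows (["─┬─".toList] ++ List.replicate rows.length " │ ".toList ++ ["─┴─".toList]))
      (pvL rows p, p.isEmpty) = (pvL rows (p ++ fs), (p ++ fs).isEmpty) := by
  intro fs
  induction fs with
  | nil => intro p; simp
  | cons f t ih =>
    intro p
    rw [List.foldl_cons, stepB_invariant rows p f,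
      show (false = (p ++ [f]).isEmpty) by simp, ih (p ++ [f])]
    simp

-- ===== VERDICT (by name: the statement is the Claim_ definition above) =====
theorem render_unicodebox_spec : Claim_equal_render_unicodebox := by
  intro fields rows _hdom _hpre
  show render_unicodebox fields rows = render_unicodebox_alt fields rows
  unfold render_unicodebox render_unicodebox_alt
  simp only [PySem.List.foldl_append_singleton_eq_map, List.nil_append]
  have h0 : (["┌─".toList] ++ List.replicate rows.length "│ ".toList ++ ["└─".toList], true)
      = (pvL rows [], ([] : List String).isEmpty) := by
    unfold pvL
    simp [PySem.Chars.join_nil]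
  rw [h0, foldB_eq rows fields []]
  simp only [List.nil_append]
  unfold pvL
  rw [lockstep2 " │".toList
    (fun row => "│ ".toList ++ PySem.Chars.join " │ ".toList
      (fields.map (fun f => pvLjust (pvCell row f) (pvW rows f) ' '))) rows]
  have ht : fields.map (fun field => pvLjust field.toList
        ((pvMaxLengthsA (List.map pvSerializedRowA rows) fields).getD field 0) '─')
      = fields.map (fun f => pvLjust f.toList (pvW rows f) '─') :=
    List.map_congr_left (fun f hf => by rw [getD_maxLengthsA rows fields f hf])
  have hbot : fields.map (fun field => List.replicate
        ((pvMaxLengthsA (List.map pvSerializedRowA rows) fields).getD field 0) '─')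
      = fields.map (fun f => List.replicate (pvW rows f) '─') :=
    List.map_congr_left (fun f hf => by rw [getD_maxLengthsA rows fields f hf])
  have hbody : (List.map pvSerializedRowA rows).map (fun x => "│ ".toList ++
        PySem.Chars.join " │ ".toList (fields.map (fun f => pvLjust (x.getD f [])
          ((pvMaxLengthsA (List.map pvSerializedRowA rows) fields).getD f 0) ' ')) ++ " │".toList)
      = rows.map (fun row => "│ ".toList ++ PySem.Chars.join " │ ".toList
          (fields.map (fun f => pvLjust (pvCell row f) (pvW rows f) ' ')) ++ " │".toList) := by
    rw [List.map_map]
    refine List.map_congr_left (fun row _ => ?_)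
    simp only [Function.comp_apply]
    have hin : fields.map (fun f => pvLjust ((pvSerializedRowA row).getD f [])
          ((pvMaxLengthsA (List.map pvSerializedRowA rows) fields).getD f 0) ' ')
        = fields.map (fun f => pvLjust (pvCell row f) (pvW rows f) ' ') :=
      List.map_congr_left (fun f hf => by
        rw [getD_serializedRowA, getD_maxLengthsA rows fields f hf])
    rw [hin]
  rw [ht, hbot, hbody]
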